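-- pv_equiv track=rewrite | github.com/ealmansouri/doc-migration-tool | network_doc_migrations_v2.py | find_matching_section
-- ===== SOURCE A (Python) =====
-- from typing import Dict, List, Optional, Tuple
--
-- def find_matching_section(old_section: str, new_sections: list[str]) -> Optional[str]:
--     """
--     Find the best matching section in the new document
--
--     Args:
--         old_section: Section heading from old document
--         new_sections: list of section headings in new document
--
--     Returns:
--         Best matching section heading or None
--     """
--     old_section_lower = old_section.lower()
--
--     # First try exact match
--     for new_section in new_sections:
--         if new_section.lower() == old_section_lower:
--             return new_section
--
--     # Clean and split into words, removing common words that don't help matching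
--     stop_words = {'the', 'a', 'an', 'and', 'or', 'of', 'to', 'in', 'for', 'on', 'at', 'by'}
--
--     # Get meaningful words from old section
--     old_words = set(old_section_lower.split()) - stop_words
--     old_words = {word.strip('.,;:!?()[]{}') for word in old_words if word.strip('.,;:!?()[]{})')}
--
--     best_match = None
--     best_match_count = 0
--
--     # Try to find section with most words in common
--     for new_section in new_sections:
--         new_section_lower = new_section.lower()
--         # Get meaningful words from new section
--         new_words = set(new_section_lower.split()) - stop_words
--         new_words = {word.strip('.,;:!?()[]{}') for word in new_words if word.strip('.,;:!?()[]{})')}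
--
--         # Find common words
--         common_words = old_words & new_words
--
--         # If at least 1 word matches, consider it a potential match
--         if len(common_words) >= 1:
--             if len(common_words) > best_match_count:
--                 best_match = new_section
--                 best_match_count = len(common_words)
--
--     return best_match
-- ===== SOURCE B (Python) =====
-- from typing import Optional
--
-- _STOP = {'the', 'a', 'an', 'and', 'or', 'of', 'to', 'in', 'for', 'on', 'at', 'by'}
-- _PUNCT = '.,;:!?()[]{}'
--
--
-- def _clean_words(text: str) -> set:
--     """Lowercase, split, drop stop words, strip punctuation, drop empties."""
--     return {w.strip(_PUNCT)
--             for w in text.lower().split()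
--             if w not in _STOP and w.strip(_PUNCT)}
--
--
-- def find_matching_section(old_section: str, new_sections: list[str]) -> Optional[str]:
--     old_lower = old_section.lower()
--     for s in new_sections:
--         if s.lower() == old_lower:
--             return s
--     # Inverted index: word -> indices of the sections whose cleaned word set contains it.
--     index = {}
--     for i, s in enumerate(new_sections):
--         for w in _clean_words(s):
--             index.setdefault(w, []).append(i)
--     # Score every section at once by walking the old words through the index.
--     counts = [0] * len(new_sections)
--     for w in _clean_words(old_section):
--         for i in index.get(w, []):
--             counts[i] += 1
--     best, bc = None, 0
--     for s, c in zip(new_sections, counts):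
--         if c > bc:
--             best, bc = s, c
--     return best
-- ===== Notes on version B (the rewrite author's own statement) =====
-- stated objective: alternative
-- what changed: A scores each new section independently by a per-section set intersection with the old words; B instead builds an inverted index (word -> list of section indices) over all new sections, accumulates every section's overlap score in one counts array by walking the old words through the index, and then takes the first strict-max of the counts.
import Mathlib
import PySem

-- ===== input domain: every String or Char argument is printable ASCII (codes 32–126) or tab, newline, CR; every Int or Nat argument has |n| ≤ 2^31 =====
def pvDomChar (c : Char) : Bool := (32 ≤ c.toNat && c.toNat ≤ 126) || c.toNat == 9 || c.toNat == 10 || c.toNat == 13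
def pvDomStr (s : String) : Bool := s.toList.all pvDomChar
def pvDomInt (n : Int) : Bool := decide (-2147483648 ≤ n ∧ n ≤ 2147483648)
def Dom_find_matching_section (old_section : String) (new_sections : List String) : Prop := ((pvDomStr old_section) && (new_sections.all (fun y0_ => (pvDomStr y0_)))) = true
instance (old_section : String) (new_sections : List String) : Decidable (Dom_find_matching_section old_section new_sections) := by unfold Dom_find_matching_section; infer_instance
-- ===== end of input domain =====

-- B replaces A's per-section set-intersection scoring by an inverted index (word -> section
-- indices) plus a counts array scored in one walk over the old words; same asymptotic cost.


set_option maxRecDepth 8192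

-- ===== PORT A =====
-- stop_words = {'the', 'a', 'an', ...}
def pvStopA : PySem.Set String :=
  PySem.Set.ofList ["the", "a", "an", "and", "or", "of", "to", "in", "for", "on", "at", "by"]

-- {word.strip('.,;:!?()[]{}') for word in words if word.strip('.,;:!?()[]{})')}
-- (a set comprehension over a set: result is a set, so Python's hash iteration order is immaterial)
def pvStripCompA (words : PySem.Set String) : PySem.Set String :=
  PySem.Set.ofList ((words.filter
      (fun w => PySem.Str.stripChars w ".,;:!?()[]{})" != "")).map
    (fun w => PySem.Str.stripChars w ".,;:!?()[]{}"))

def find_matching_section (old_section : String) (new_sections : List String) : Option String :=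
  let old_section_lower := PySem.Str.lower old_section
  -- first loop: exact match, return new_section
  match new_sections.find? (fun new_section => PySem.Str.lower new_section == old_section_lower) with
  | some new_section => some new_section
  | none =>
    let old_words := pvStripCompA
      (PySem.Set.diff (PySem.Set.ofList (PySem.Str.split₀ old_section_lower)) pvStopA)
    -- second loop, carrying (best_match, best_match_count)
    let r := new_sections.foldl (fun (acc : Option String × Nat) new_section =>
      let new_words := pvStripCompA
        (PySem.Set.diff (PySem.Set.ofList (PySem.Str.split₀ (PySem.Str.lower new_section))) pvStopA)
      let common := PySem.Set.inter old_words new_words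
      if common.length ≥ 1 then
        if common.length > acc.2 then (some new_section, common.length) else acc
      else acc) (none, 0)
    r.1

-- ===== PORT B =====
def pvStopB : PySem.Set String :=
  PySem.Set.ofList ["the", "a", "an", "and", "or", "of", "to", "in", "for", "on", "at", "by"]

-- _clean_words: one comprehension over the split word list
def pvCleanWordsB (text : String) : PySem.Set String :=
  PySem.Set.ofList (((PySem.Str.split₀ (PySem.Str.lower text)).filter
      (fun w => !(pvStopB.contains w) && PySem.Str.stripChars w ".,;:!?()[]{}" != "")).map
    (fun w => PySem.Str.stripChars w ".,;:!?()[]{}"))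

-- inverted index: for i, s in enumerate(new_sections): for w in _clean_words(s): index.setdefault(w, []).append(i)
-- (iterating the word SET feeds a Dict of per-word index lists whose contents do not depend on that order)
def pvIndexB (new_sections : List String) : PySem.Dict String (List Int) :=
  (PySem.List.enumerate new_sections).foldl
    (fun d p => (pvCleanWordsB p.2).foldl (fun d w => d.modify w [] (· ++ [p.1])) d)
    PySem.Dict.empty

-- counts = [0]*n; for w in _clean_words(old): for i in index.get(w, []): counts[i] += 1
-- (index entries i come from enumerate, hence 0 ≤ i: counts[i] += 1 is c.set i.toNat (… + 1), exact here)
def pvCountsB (old_section : String) (idx : PySem.Dict String (List Int)) (n : Nat) : List Nat :=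
  (pvCleanWordsB old_section).foldl
    (fun c w => (idx.getD w []).foldl (fun c i => c.set i.toNat (c.getD i.toNat 0 + 1)) c)
    (List.replicate n 0)

def find_matching_section_alt (old_section : String) (new_sections : List String) : Option String :=
  let old_lower := PySem.Str.lower old_section
  match new_sections.find? (fun s => PySem.Str.lower s == old_lower) with
  | some s => some s
  | none =>
    let idx := pvIndexB new_sections
    let counts := pvCountsB old_section idx new_sections.length
    -- for s, c in zip(new_sections, counts): if c > bc: best, bc = s, c
    ((new_sections.zip counts).foldl
      (fun (acc : Option String × Nat) p => if p.2 > acc.2 then (some p.1, p.2) else acc)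
      (none, 0)).1

-- ===== PRECONDITION & SPEC =====
def Spec_find_matching_section (old_section : String) (new_sections : List String) (out : Option String) : Prop := out = find_matching_section_alt old_section new_sections
instance (old_section : String) (new_sections : List String) (out : Option String) : Decidable (Spec_find_matching_section old_section new_sections out) := by unfold Spec_find_matching_section; infer_instance

-- ===== CLAIM (what is proved, stated in full; the proofs are below) =====
def Claim_equal_find_matching_section : Prop := ∀ (old_section : String) (new_sections : List String), Dom_find_matching_section old_section new_sections → Spec_find_matching_section old_section new_sections (find_matching_section old_section new_sections)

-- ===== LEMMAS AND PROOFS =====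

-- A's overlap score of a candidate section s against old_section o, counted from o's side
def pvOv (o s : String) : Nat :=
  ((pvCleanWordsB o).filter (fun w => (pvCleanWordsB s).contains w)).length

-- the two strip-character strings contain the same characters
theorem pvContainsChar_congr (c : Char) :
    (".,;:!?()[]{})".toList.contains c) = (".,;:!?()[]{}".toList.contains c) := by
  have h1 : ".,;:!?()[]{})".toList = ".,;:!?()[]{}".toList ++ [')'] := by decide
  rw [h1, List.contains_append]
  by_cases h : c = ')'
  · subst h; simp
  · simp
    intro hc
    exact absurd hc h

-- so stripping with A's extra ')' (its filter guard) strips the same characters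
theorem pvStrip_congr (w : String) :
    PySem.Str.stripChars w ".,;:!?()[]{})" = PySem.Str.stripChars w ".,;:!?()[]{}" := by
  unfold PySem.Str.stripChars PySem.Chars.stripChars
  rw [funext pvContainsChar_congr]

-- A's cleaned word set and B's have the same members
set_option maxHeartbeats 1000000 in
theorem pvMem_clean (s w : String) :
    w ∈ pvStripCompA (PySem.Set.diff (PySem.Set.ofList (PySem.Str.split₀ (PySem.Str.lower s))) pvStopA)
      ↔ w ∈ pvCleanWordsB s := by
  simp only [pvStripCompA, pvCleanWordsB, pvStopA, pvStopB, pvStrip_congr, PySem.Set.mem_ofList,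
    List.mem_map, List.mem_filter, PySem.Set.mem_diff, PySem.Set.mem_ofList,
    Bool.and_eq_true, Bool.not_eq_true', PySem.Set.contains_eq_listContains,
    List.contains_eq_mem, decide_eq_false_iff_not, bne_iff_ne, ne_eq]
  tauto

-- both are duplicate-free, so they are permutations of each other
theorem pvClean_perm (s : String) :
    (pvStripCompA (PySem.Set.diff (PySem.Set.ofList (PySem.Str.split₀ (PySem.Str.lower s))) pvStopA)).Perm
      (pvCleanWordsB s) := by
  have h1 : (pvStripCompA (PySem.Set.diff (PySem.Set.ofList (PySem.Str.split₀ (PySem.Str.lower s))) pvStopA)).Nodup := by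
    unfold pvStripCompA; exact PySem.Set.nodup_ofList _
  have h2 : (pvCleanWordsB s).Nodup := by
    unfold pvCleanWordsB; exact PySem.Set.nodup_ofList _
  rw [List.perm_ext_iff_of_nodup h1 h2]
  exact fun w => pvMem_clean s w

theorem pvContains_congr (s : String) (w : String) :
    PySem.Set.contains (pvStripCompA (PySem.Set.diff (PySem.Set.ofList (PySem.Str.split₀ (PySem.Str.lower s))) pvStopA)) w
      = PySem.Set.contains (pvCleanWordsB s) w := by
  simp only [PySem.Set.contains_eq_listContains, List.contains_eq_mem]
  exact decide_eq_decide.mpr (pvMem_clean s w)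

-- A's common-word count |old ∩ new| equals pvOv
theorem pvCount_eq (o s : String) :
    (PySem.Set.inter
        (pvStripCompA (PySem.Set.diff (PySem.Set.ofList (PySem.Str.split₀ (PySem.Str.lower o))) pvStopA))
        (pvStripCompA (PySem.Set.diff (PySem.Set.ofList (PySem.Str.split₀ (PySem.Str.lower s))) pvStopA))).length
      = pvOv o s := by
  unfold PySem.Set.inter pvOv
  rw [funext (pvContains_congr s)]
  exact (((pvClean_perm o).filter _)).length_eq

-- the nested index-building fold is the flat fold over (word, index) pairs
theorem pvIndex_flat (ns : List String) :
    pvIndexB ns =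
      ((PySem.List.enumerate ns).flatMap
        (fun p => (pvCleanWordsB p.2).map (fun w => (w, p.1)))).foldl
        (fun d q => d.modify q.1 [] (· ++ [q.2])) PySem.Dict.empty := by
  unfold pvIndexB
  have gen : ∀ (l : List (Int × String)) (d : PySem.Dict String (List Int)),
      l.foldl (fun d p => (pvCleanWordsB p.2).foldl (fun d w => d.modify w [] (· ++ [p.1])) d) d
        = (l.flatMap (fun p => (pvCleanWordsB p.2).map (fun w => (w, p.1)))).foldl
            (fun d q => d.modify q.1 [] (· ++ [q.2])) d := by
    intro l
    induction l with
    | nil => intro d; rfl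
    | cons x t ih =>
      intro d
      simp only [List.foldl_cons, List.flatMap_cons, List.foldl_append, ih, List.foldl_map]
  exact gen _ _

theorem pvCleanB_nodup (s : String) : (pvCleanWordsB s).Nodup := by
  unfold pvCleanWordsB; exact PySem.Set.nodup_ofList _

theorem pvFlatMap_ite {α β : Type} (l : List α) (q : α → Bool) (f : α → β) :
    l.flatMap (fun x => if q x then [f x] else []) = (l.filter q).map f := by
  induction l with
  | nil => rfl
  | cons x t ih =>
    rw [List.flatMap_cons, ih]
    by_cases h : q x
    · rw [if_pos h, List.filter_cons_of_pos h, List.map_cons]; rfl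
    · rw [if_neg h, List.filter_cons_of_neg h, List.nil_append]

-- the index maps w to the (ascending) indices of the sections whose cleaned set holds w
theorem pvIndex_getD (ns : List String) (w : String) :
    (pvIndexB ns).getD w [] =
      ((PySem.List.enumerate ns).filter (fun p => (pvCleanWordsB p.2).contains w)).map (·.1) := by
  rw [pvIndex_flat, PySem.Dict.getD_foldl_modify_append]
  rw [PySem.Dict.getD_empty, List.nil_append]
  rw [List.filter_flatMap]
  have h1 : ∀ p : Int × String,
      (((pvCleanWordsB p.2).map (fun w' => (w', p.1))).filter (fun q => q.1 == w)).map (·.2)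
        = if (pvCleanWordsB p.2).contains w then [p.1] else [] := by
    intro p
    rw [List.filter_map]
    have h2 : ((pvCleanWordsB p.2).filter ((fun q => q.1 == w) ∘ (fun w' => (w', p.1)))) =
        (pvCleanWordsB p.2).filter (fun w' => w' == w) := by rfl
    rw [h2, List.filter_beq]
    by_cases hm : w ∈ pvCleanWordsB p.2
    · simp [List.count_eq_one_of_mem (pvCleanB_nodup p.2) hm,
        PySem.Set.contains_eq_listContains, List.contains_eq_mem, hm]
    · simp [List.count_eq_zero_of_not_mem hm, PySem.Set.contains_eq_listContains,
        List.contains_eq_mem, hm]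
  calc (((PySem.List.enumerate ns).flatMap fun p => ((pvCleanWordsB p.2).map (fun w' => (w', p.1))).filter (fun q => q.1 == w)).map (·.2))
      = (PySem.List.enumerate ns).flatMap (fun p => (((pvCleanWordsB p.2).map (fun w' => (w', p.1))).filter (fun q => q.1 == w)).map (·.2)) := by
        rw [List.map_flatMap]
    _ = (PySem.List.enumerate ns).flatMap (fun p => if (pvCleanWordsB p.2).contains w then [p.1] else []) := by
        exact List.flatMap_congr (fun p _ => h1 p)
    _ = ((PySem.List.enumerate ns).filter (fun p => (pvCleanWordsB p.2).contains w)).map (·.1) := by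
        exact pvFlatMap_ite _ _ _

-- every index entry is a nonnegative position
theorem pvIndex_nonneg (ns : List String) (w : String) :
    ∀ i ∈ (pvIndexB ns).getD w [], 0 ≤ i := by
  intro i hi
  rw [pvIndex_getD] at hi
  obtain ⟨p, hp, rfl⟩ := List.mem_map.mp hi
  obtain ⟨k, hk, rfl⟩ := (PySem.List.mem_enumerate_iff ns 0 p).mp (List.mem_of_mem_filter hp)
  simp

-- counts[i] += 1 loops: length is preserved
theorem pvSetFold_length (l : List Int) (c : List Nat) :
    (l.foldl (fun c i => c.set i.toNat (c.getD i.toNat 0 + 1)) c).length = c.length := by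
  induction l generalizing c with
  | nil => rfl
  | cons i t ih => rw [List.foldl_cons, ih, List.length_set]

-- and each cell counts the occurrences of its index (entries are nonnegative)
theorem pvSetFold_getD (l : List Int) (c : List Nat) (j : Nat)
    (hj : j < c.length) (hl : ∀ i ∈ l, 0 ≤ i) :
    (l.foldl (fun c i => c.set i.toNat (c.getD i.toNat 0 + 1)) c).getD j 0
      = c.getD j 0 + l.count (j : Int) := by
  induction l generalizing c with
  | nil => simp
  | cons i t ih =>
    have hi : 0 ≤ i := hl i (List.mem_cons_self)
    rw [List.foldl_cons, ih _ (by rw [List.length_set]; exact hj) (fun x hx => hl x (List.mem_cons_of_mem _ hx)),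
        List.count_cons]
    have hset : (c.set i.toNat (c.getD i.toNat 0 + 1)).getD j 0
        = c.getD j 0 + (if i = (j:Int) then 1 else 0) := by
      by_cases hij : i = (j:Int)
      · subst hij
        rw [if_pos rfl]
        simp only [Int.toNat_natCast] at *
        rw [List.getD_eq_getElem?_getD, List.getElem?_set_self (by exact hj), List.getD_eq_getElem?_getD]
        simp [List.getElem?_eq_getElem hj]
      · rw [if_neg hij]
        have hne : i.toNat ≠ j := by omega
        rw [List.getD_eq_getElem?_getD, List.getElem?_set_ne hne, ← List.getD_eq_getElem?_getD, Nat.add_zero]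
    rw [hset]
    by_cases hij : (i == (j:Int)) = true
    · simp only [beq_iff_eq] at hij; simp [hij]; omega
    · simp only [beq_iff_eq] at hij; simp [hij]

-- the whole counts array: cell j sums the per-word counts
theorem pvCounts_getD (o : String) (ns : List String) (j : Nat) (hj : j < ns.length) :
    (pvCountsB o (pvIndexB ns) ns.length).getD j 0
      = ((pvCleanWordsB o).map (fun w => ((pvIndexB ns).getD w []).count (j : Int))).sum := by
  unfold pvCountsB
  have gen : ∀ (ws : List String) (c : List Nat), j < c.length →
      (ws.foldl (fun c w => ((pvIndexB ns).getD w []).foldl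
          (fun c i => c.set i.toNat (c.getD i.toNat 0 + 1)) c) c).getD j 0
        = c.getD j 0 + (ws.map (fun w => ((pvIndexB ns).getD w []).count (j : Int))).sum := by
    intro ws
    induction ws with
    | nil => intro c _; simp
    | cons w t ih =>
      intro c hc
      rw [List.foldl_cons, ih _ (by rw [pvSetFold_length]; exact hc),
          pvSetFold_getD _ _ _ hc (pvIndex_nonneg ns w), List.map_cons, List.sum_cons]
      omega
  rw [gen _ _ (by rw [List.length_replicate]; exact hj)]
  simp

-- per word: the index list holds j once iff w is in section j's cleaned set
theorem pvIndex_count (ns : List String) (w : String) (j : Nat) (hj : j < ns.length) :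
    ((pvIndexB ns).getD w []).count (j : Int)
      = if (pvCleanWordsB ns[j]).contains w then 1 else 0 := by
  rw [pvIndex_getD]
  have hnd : (((PySem.List.enumerate ns).filter (fun p => (pvCleanWordsB p.2).contains w)).map (·.1)).Nodup := by
    apply List.Pairwise.imp (fun {a b} (h : a < b) => ne_of_lt h)
    exact List.Pairwise.map _ (fun a b h => h) ((PySem.List.pairwise_lt_enumerate ns 0).filter _)
  have hmem : (j : Int) ∈ ((PySem.List.enumerate ns).filter (fun p => (pvCleanWordsB p.2).contains w)).map (·.1)
      ↔ (pvCleanWordsB ns[j]).contains w = true := by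
    constructor
    · intro h
      obtain ⟨p, hp, hp1⟩ := List.mem_map.mp h
      have hq := List.of_mem_filter hp
      obtain ⟨k, hk, rfl⟩ := (PySem.List.mem_enumerate_iff ns 0 p).mp (List.mem_of_mem_filter hp)
      simp only at hp1 hq
      have : k = j := by omega
      subst this
      exact hq
    · intro h
      refine List.mem_map.mpr ⟨((j : Int), ns[j]), List.mem_filter.mpr ⟨?_, h⟩, rfl⟩
      exact (PySem.List.mem_enumerate_iff ns 0 _).mpr ⟨j, hj, by simp⟩
  by_cases h : (pvCleanWordsB ns[j]).contains w
  · rw [if_pos h, List.count_eq_one_of_mem hnd (hmem.mpr h)]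
  · rw [if_neg h, List.count_eq_zero_of_not_mem (fun hm => h (hmem.mp hm))]

theorem pvSum_map_ite (ws : List String) (p : String → Bool) :
    (ws.map (fun w => if p w then 1 else 0)).sum = ws.countP p := by
  induction ws with
  | nil => rfl
  | cons w t ih =>
    by_cases h : p w
    · simp [h, ih]; omega
    · simp [h, ih]

-- counts = the per-section overlap scores, in section order
theorem pvCounts_eq_map (o : String) (ns : List String) :
    pvCountsB o (pvIndexB ns) ns.length = ns.map (pvOv o) := by
  apply List.ext_getElem
  · rw [List.length_map]
    unfold pvCountsB
    have gen : ∀ (ws : List String) (c : List Nat),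
        (ws.foldl (fun c w => ((pvIndexB ns).getD w []).foldl
            (fun c i => c.set i.toNat (c.getD i.toNat 0 + 1)) c) c).length = c.length := by
      intro ws
      induction ws with
      | nil => intro c; rfl
      | cons w t ih => intro c; rw [List.foldl_cons, ih, pvSetFold_length]
    rw [gen, List.length_replicate]
  · intro j h1 h2
    rw [← List.getD_eq_getElem _ 0 h1, ← List.getD_eq_getElem _ 0 h2]
    have hj : j < ns.length := by rw [List.length_map] at h2; exact h2
    rw [pvCounts_getD o ns j hj]
    have : ((pvCleanWordsB o).map (fun w => ((pvIndexB ns).getD w []).count (j : Int)))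
        = ((pvCleanWordsB o).map (fun w => if (pvCleanWordsB ns[j]).contains w then 1 else 0)) := by
      exact List.map_congr_left (fun w _ => pvIndex_count ns w j hj)
    rw [this, pvSum_map_ite, List.getD_eq_getElem _ 0 h2, List.getElem_map]
    unfold pvOv
    rw [List.countP_eq_length_filter]

-- ===== VERDICT (by name: the statement is the Claim_ definition above) =====
theorem find_matching_section_spec : Claim_equal_find_matching_section := by
  intro o ns _
  unfold Spec_find_matching_section find_matching_section find_matching_section_alt
  cases hf : ns.find? (fun s => PySem.Str.lower s == PySem.Str.lower o) with
  | some s => simp only [hf]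
  | none =>
    simp only [hf]
    rw [pvCounts_eq_map]
    rw [← List.map_prod_left_eq_zip, List.foldl_map]
    apply congrArg Prod.fst
    apply PySem.List.foldl_congr_mem
    intro acc s _
    rw [pvCount_eq o s]
    by_cases h : pvOv o s > acc.2
    · rw [if_pos h, if_pos (by omega : pvOv o s ≥ 1)]
    · rw [if_neg h]
      by_cases h1 : pvOv o s ≥ 1
      · rw [if_pos h1]
      · rw [if_neg h1]
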